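-- pv_equiv track=rewrite | github.com/PLSE-Lab/Python-MLAPI-expl | python_sources/word-analysis-of-an-author-s-works.py | positionalPairingOfTwoArrays
-- ===== SOURCE A (Python) =====
-- def positionalPairingOfTwoArrays(rootPointArray, comparisonArray, forwardThreshold=0, backwardThreshold=0):
--     result = []
--     for i in range(len(rootPointArray)):
--             for j in range(len(comparisonArray)):
--                    root = rootPointArray[i]
--                    sample = comparisonArray[j]
--                    if sample <= (root + forwardThreshold) and sample > root:
--                        result.append((root, sample))
--                    if sample >= (root - backwardThreshold) and sample < root:
--                        result.append((root, sample))
--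
--     return result
-- ===== SOURCE B (Python) =====
-- def positionalPairingOfTwoArrays(rootPointArray, comparisonArray, forwardThreshold=0, backwardThreshold=0):
--     # Sort the comparison values (with their indices) once; for each root, locate
--     # the backward window [root-backwardThreshold, root) and the forward window
--     # (root, root+forwardThreshold] by binary search, then restore index order.
--     pairs = sorted(enumerate(comparisonArray), key=lambda p: p[1])
--     values = [s for _, s in pairs]
--
--     def bisect_left(x):
--         lo, hi = 0, len(values)
--         while lo < hi:
--             mid = (lo + hi) // 2
--             if values[mid] < x:
--                 lo = mid + 1
--             else:
--                 hi = mid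
--         return lo
--
--     def bisect_right(x):
--         lo, hi = 0, len(values)
--         while lo < hi:
--             mid = (lo + hi) // 2
--             if values[mid] <= x:
--                 lo = mid + 1
--             else:
--                 hi = mid
--         return lo
--
--     result = []
--     for root in rootPointArray:
--         window = (pairs[bisect_left(root - backwardThreshold):bisect_left(root)]
--                   + pairs[bisect_right(root):bisect_right(root + forwardThreshold)])
--         for _, s in sorted(window, key=lambda p: p[0]):
--             result.append((root, s))
--     return result
-- ===== Notes on version B (the rewrite author's own statement) =====
-- stated objective: alternative
-- what changed: Instead of the nested root-by-sample scan, B sorts the comparison values (with indices) once, locates each root's backward and forward threshold windows by binary search, and re-sorts each window by original index; output-sensitive, faster on sparse matches but not measurably faster when thresholds make matches dense.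
import Mathlib
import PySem

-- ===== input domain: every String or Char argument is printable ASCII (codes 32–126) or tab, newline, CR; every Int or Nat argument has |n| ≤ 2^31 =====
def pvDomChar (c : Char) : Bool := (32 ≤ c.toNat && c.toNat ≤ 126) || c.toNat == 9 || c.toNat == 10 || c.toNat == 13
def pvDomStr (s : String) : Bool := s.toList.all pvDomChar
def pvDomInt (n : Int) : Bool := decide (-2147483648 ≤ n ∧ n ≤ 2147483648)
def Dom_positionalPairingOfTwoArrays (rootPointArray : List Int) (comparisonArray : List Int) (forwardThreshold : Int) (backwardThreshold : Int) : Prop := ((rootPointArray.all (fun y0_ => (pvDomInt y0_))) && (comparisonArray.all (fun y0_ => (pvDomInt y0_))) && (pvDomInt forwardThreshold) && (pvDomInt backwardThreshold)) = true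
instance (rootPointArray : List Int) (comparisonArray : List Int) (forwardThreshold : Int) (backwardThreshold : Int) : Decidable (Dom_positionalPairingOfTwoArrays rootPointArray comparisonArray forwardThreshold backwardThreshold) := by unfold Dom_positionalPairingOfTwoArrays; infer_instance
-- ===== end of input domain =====

-- B replaces A's nested O(n·m) scan by sorting the comparison values once and binary-searching
-- the backward/forward window per root, restoring index order by a per-window sort (alternative algorithm).

-- ===== PORT A =====
def positionalPairingOfTwoArrays (rootPointArray : List Int) (comparisonArray : List Int) (forwardThreshold : Int) (backwardThreshold : Int) : List (Int × Int) :=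
  rootPointArray.foldl (fun result root =>
    comparisonArray.foldl (fun result sample =>
      let result := if sample ≤ root + forwardThreshold ∧ sample > root then result ++ [(root, sample)] else result
      if sample ≥ root - backwardThreshold ∧ sample < root then result ++ [(root, sample)] else result)
      result) []

-- ===== PORT B =====
-- Source B's hand-written bisect_left/bisect_right are the standard lo/hi halving loops,
-- transcribed as PySem.List.bisectLeft / bisectRight (identical loop: mid = (lo+hi)//2, compare, narrow).
def positionalPairingOfTwoArrays_alt (rootPointArray : List Int) (comparisonArray : List Int) (forwardThreshold : Int) (backwardThreshold : Int) : List (Int × Int) :=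
  let pairs := PySem.List.sorted (PySem.List.enumerate comparisonArray) (fun p => p.2)
  let values := pairs.map (fun p => p.2)
  rootPointArray.foldl (fun result root =>
    let window :=
      PySem.List.slice pairs (some ((PySem.List.bisectLeft values (root - backwardThreshold) : Nat) : Int))
                             (some ((PySem.List.bisectLeft values root : Nat) : Int))
      ++ PySem.List.slice pairs (some ((PySem.List.bisectRight values root : Nat) : Int))
                                (some ((PySem.List.bisectRight values (root + forwardThreshold) : Nat) : Int))
    (PySem.List.sorted window (fun p => p.1)).foldl (fun result p => result ++ [(root, p.2)]) result) []

-- ===== PRECONDITION & SPEC =====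
def Spec_positionalPairingOfTwoArrays (rootPointArray : List Int) (comparisonArray : List Int) (forwardThreshold : Int) (backwardThreshold : Int) (out : List (Int × Int)) : Prop := out = positionalPairingOfTwoArrays_alt rootPointArray comparisonArray forwardThreshold backwardThreshold
instance (rootPointArray : List Int) (comparisonArray : List Int) (forwardThreshold : Int) (backwardThreshold : Int) (out : List (Int × Int)) : Decidable (Spec_positionalPairingOfTwoArrays rootPointArray comparisonArray forwardThreshold backwardThreshold out) := by unfold Spec_positionalPairingOfTwoArrays; infer_instance

-- ===== CLAIM (what is proved, stated in full; the proofs are below) =====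
def Claim_equal_positionalPairingOfTwoArrays : Prop := ∀ (rootPointArray : List Int) (comparisonArray : List Int) (forwardThreshold : Int) (backwardThreshold : Int), Dom_positionalPairingOfTwoArrays rootPointArray comparisonArray forwardThreshold backwardThreshold → Spec_positionalPairingOfTwoArrays rootPointArray comparisonArray forwardThreshold backwardThreshold (positionalPairingOfTwoArrays rootPointArray comparisonArray forwardThreshold backwardThreshold)

-- ===== LEMMAS AND PROOFS =====

-- A's per-root predicate (forward-or-backward hit), as a Bool.
def pvPred (f b r s : Int) : Bool :=
  decide (s ≤ r + f ∧ s > r) || decide (s ≥ r - b ∧ s < r)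

-- A's inner loop appends exactly the filtered samples, in order.
lemma pvInnerA (f b r : Int) : ∀ (comp : List Int) (acc : List (Int × Int)),
    comp.foldl (fun result sample =>
      let result := if sample ≤ r + f ∧ sample > r then result ++ [(r, sample)] else result
      if sample ≥ r - b ∧ sample < r then result ++ [(r, sample)] else result) acc
    = acc ++ (comp.filter (pvPred f b r)).map (fun s => (r, s)) := by
  intro comp
  induction comp with
  | nil => intro acc; simp
  | cons s t ih =>
    intro acc
    simp only [List.foldl_cons, List.filter_cons]
    by_cases h1 : s ≤ r + f ∧ s > r
    · have h2 : ¬ (s ≥ r - b ∧ s < r) := by omega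
      have hp : pvPred f b r s = true := by simp [pvPred, h1]
      simp only [if_pos h1, if_neg h2, hp, ih, if_pos]
      simp
    · by_cases h2 : s ≥ r - b ∧ s < r
      · have hp : pvPred f b r s = true := by simp [pvPred, h2]
        simp only [if_neg h1, if_pos h2, hp, ih, if_pos]
        simp
      · have hp : pvPred f b r s = false := by simp [pvPred, h1]; omega
        simp only [if_neg h1, if_neg h2, hp, ih]
        simp

-- A slice bounded by the indices of an all-false / all-true / all-false split is the filter.
lemma pvTakeDropFilter {α : Type} (P : α → Bool) :
    ∀ (l : List α) (a c : Nat), c ≤ l.length →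
    (∀ (j : Nat) (hj : j < l.length), j < a → P l[j] = false) →
    (∀ (j : Nat) (hj : j < l.length), a ≤ j → j < c → P l[j] = true) →
    (∀ (j : Nat) (hj : j < l.length), c ≤ j → P l[j] = false) →
    (l.drop a).take (c - a) = l.filter P := by
  intro l
  induction l with
  | nil => intro a c _ _ _ _; simp
  | cons h t ih =>
    intro a c hc h1 h2 h3
    cases a with
    | zero =>
      cases c with
      | zero =>
        have hall : ∀ x ∈ h :: t, P x = false := by
          intro x hx
          obtain ⟨j, hj, rfl⟩ := List.mem_iff_getElem.mp hx
          exact h3 j hj (Nat.zero_le j)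
        have hfil : List.filter P (h :: t) = [] :=
          List.filter_eq_nil_iff.mpr (fun x hx => by simp [hall x hx])
        simp [hfil]
      | succ c' =>
        have hh : P h = true := h2 0 (by simp) (Nat.zero_le 0) (Nat.succ_pos c')
        simp only [List.drop_zero, Nat.sub_zero, List.take_succ_cons, List.filter_cons, hh,
          if_pos]
        have := ih 0 c' (by simpa using Nat.succ_le_succ_iff.mp hc)
          (fun j hj hja => absurd hja (Nat.not_lt_zero j))
          (fun j hj _ hjc => h2 (j+1) (by simpa using Nat.succ_lt_succ hj) (Nat.zero_le _) (Nat.succ_lt_succ hjc))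
          (fun j hj hcj => h3 (j+1) (by simpa using Nat.succ_lt_succ hj) (Nat.succ_le_succ hcj))
        simpa using this
    | succ a' =>
      have hh : P h = false := h1 0 (by simp) (Nat.succ_pos a')
      simp only [List.drop_succ_cons, List.filter_cons, hh]
      have heq : c - (a' + 1) = (c - 1) - a' := by omega
      rw [heq]
      have := ih a' (c - 1) (by simp at hc; omega)
        (fun j hj hja => h1 (j+1) (by simpa using Nat.succ_lt_succ hj) (by omega))
        (fun j hj hja hjc => h2 (j+1) (by simpa using Nat.succ_lt_succ hj) (by omega) (by omega))
        (fun j hj hcj => h3 (j+1) (by simpa using Nat.succ_lt_succ hj) (by omega))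
      simp [this]

-- disjoint filters concatenated are a permutation of the filter of the disjunction
lemma pvFilterOrPerm {α : Type} (p q : α → Bool) :
    ∀ (l : List α), (∀ x ∈ l, ¬(p x = true ∧ q x = true)) →
    (l.filter p ++ l.filter q).Perm (l.filter (fun x => p x || q x)) := by
  intro l
  induction l with
  | nil => intro _; simp
  | cons h t ih =>
    intro hd
    have iht := ih (fun x hx => hd x (List.mem_cons_of_mem h hx))
    cases hp : p h with
    | true =>
      have hq : q h = false := by
        cases hq : q h
        · rfl
        · exact absurd ⟨hp, hq⟩ (hd h (List.mem_cons_self ..))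
      simp only [List.filter_cons, hp, hq, Bool.true_or, if_pos, Bool.false_eq_true,
        List.cons_append]
      exact iht.cons h
    | false =>
      cases hq : q h with
      | true =>
        simp only [List.filter_cons, hp, hq, Bool.false_eq_true, if_pos, Bool.false_or]
        exact List.perm_middle.trans (iht.cons h)
      | false =>
        simp only [List.filter_cons, hp, hq, Bool.false_eq_true, Bool.false_or]
        exact iht

-- projecting the enumerate filter back to values
lemma pvEnumFilterMap (q : Int → Bool) (r : Int) :
    ∀ (xs : List Int) (s : Int),
    ((PySem.List.enumerate xs s).filter (fun p => q p.2)).map (fun p => (r, p.2))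
      = (xs.filter q).map (fun v => (r, v)) := by
  intro xs
  induction xs with
  | nil => intro s; simp [PySem.List.enumerate_nil]
  | cons x t ih =>
    intro s
    rw [PySem.List.enumerate_cons]
    by_cases hq : q x = true
    · simp only [List.filter_cons, hq, if_pos, List.map_cons]
      simp [ih (s+1)]
    · have : q x = false := by simpa using hq
      simp only [List.filter_cons, this, Bool.false_eq_true]
      exact ih (s+1)

-- backward window: slice between bisectLeft bounds is the [x, y) filter
lemma pvWindowLeft (pairs : List (Int × Int)) (hs : pairs.Pairwise (fun a b => a.2 ≤ b.2)) (x y : Int) :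
    (pairs.drop (PySem.List.bisectLeft (pairs.map (fun p => p.2)) x)).take
      (PySem.List.bisectLeft (pairs.map (fun p => p.2)) y - PySem.List.bisectLeft (pairs.map (fun p => p.2)) x)
    = pairs.filter (fun p => decide (x ≤ p.2 ∧ p.2 < y)) := by
  set values := pairs.map (fun p => p.2) with hv
  have hvs : values.Pairwise (fun a b => a ≤ b) := hs.map _ (fun a b h => h)
  have hxs := PySem.List.bisectLeft_spec values x hvs
  have hys := PySem.List.bisectLeft_spec values y hvs
  have hlen : values.length = pairs.length := by simp [hv]
  apply pvTakeDropFilter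
  · omega
  · intro j hj hja
    have := hxs.2.1 j (by omega) hja
    simp only [hv, List.getElem_map] at this
    simp only [decide_eq_false_iff_not]
    omega
  · intro j hj hja hjc
    have h1 := hxs.2.2 j (by omega) hja
    have h2 := hys.2.1 j (by omega) hjc
    simp only [hv, List.getElem_map] at h1 h2
    simp only [decide_eq_true_eq]
    omega
  · intro j hj hcj
    have := hys.2.2 j (by omega) hcj
    simp only [hv, List.getElem_map] at this
    simp only [decide_eq_false_iff_not]
    omega

-- forward window: slice between bisectRight bounds is the (x, y] filter
lemma pvWindowRight (pairs : List (Int × Int)) (hs : pairs.Pairwise (fun a b => a.2 ≤ b.2)) (x y : Int) :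
    (pairs.drop (PySem.List.bisectRight (pairs.map (fun p => p.2)) x)).take
      (PySem.List.bisectRight (pairs.map (fun p => p.2)) y - PySem.List.bisectRight (pairs.map (fun p => p.2)) x)
    = pairs.filter (fun p => decide (x < p.2 ∧ p.2 ≤ y)) := by
  set values := pairs.map (fun p => p.2) with hv
  have hvs : values.Pairwise (fun a b => a ≤ b) := hs.map _ (fun a b h => h)
  have hxs := PySem.List.bisectRight_spec values x hvs
  have hys := PySem.List.bisectRight_spec values y hvs
  have hlen : values.length = pairs.length := by simp [hv]
  apply pvTakeDropFilter
  · omega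
  · intro j hj hja
    have := hxs.2.1 j (by omega) hja
    simp only [hv, List.getElem_map] at this
    simp only [decide_eq_false_iff_not]
    omega
  · intro j hj hja hjc
    have h1 := hxs.2.2 j (by omega) hja
    have h2 := hys.2.1 j (by omega) hjc
    simp only [hv, List.getElem_map] at h1 h2
    simp only [decide_eq_true_eq]
    omega
  · intro j hj hcj
    have := hys.2.2 j (by omega) hcj
    simp only [hv, List.getElem_map] at this
    simp only [decide_eq_false_iff_not]
    omega

-- B's per-root contribution equals A's per-root contribution
lemma pvPerRoot (comp : List Int) (f b r : Int) :
    (PySem.List.sorted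
      (PySem.List.slice (PySem.List.sorted (PySem.List.enumerate comp) (fun p => p.2))
          (some ((PySem.List.bisectLeft ((PySem.List.sorted (PySem.List.enumerate comp) (fun p => p.2)).map (fun p => p.2)) (r - b) : Nat) : Int))
          (some ((PySem.List.bisectLeft ((PySem.List.sorted (PySem.List.enumerate comp) (fun p => p.2)).map (fun p => p.2)) r : Nat) : Int))
        ++ PySem.List.slice (PySem.List.sorted (PySem.List.enumerate comp) (fun p => p.2))
          (some ((PySem.List.bisectRight ((PySem.List.sorted (PySem.List.enumerate comp) (fun p => p.2)).map (fun p => p.2)) r : Nat) : Int))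
          (some ((PySem.List.bisectRight ((PySem.List.sorted (PySem.List.enumerate comp) (fun p => p.2)).map (fun p => p.2)) (r + f) : Nat) : Int)))
      (fun p => p.1)).map (fun p => (r, p.2))
    = (comp.filter (pvPred f b r)).map (fun s => (r, s)) := by
  set pairs := PySem.List.sorted (PySem.List.enumerate comp) (fun p => p.2) with hp
  have hs : pairs.Pairwise (fun a b => a.2 ≤ b.2) := PySem.List.sorted_pairwise _ _
  set pb := fun p : Int × Int => decide (r - b ≤ p.2 ∧ p.2 < r) with hpb
  set pf := fun p : Int × Int => decide (r < p.2 ∧ p.2 ≤ r + f) with hpf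
  have hb : PySem.List.slice pairs
      (some ((PySem.List.bisectLeft (pairs.map (fun p => p.2)) (r - b) : Nat) : Int))
      (some ((PySem.List.bisectLeft (pairs.map (fun p => p.2)) r : Nat) : Int)) = pairs.filter pb := by
    rw [PySem.List.slice_natCast]
    exact pvWindowLeft pairs hs (r - b) r
  have hf : PySem.List.slice pairs
      (some ((PySem.List.bisectRight (pairs.map (fun p => p.2)) r : Nat) : Int))
      (some ((PySem.List.bisectRight (pairs.map (fun p => p.2)) (r + f) : Nat) : Int)) = pairs.filter pf := by
    rw [PySem.List.slice_natCast]
    exact pvWindowRight pairs hs r (r + f)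
  rw [hb, hf]
  -- the concatenated windows are a permutation of enumerate filtered by the disjunction
  have hdisj : ∀ p : Int × Int, ¬(pb p = true ∧ pf p = true) := by
    intro p
    simp only [hpb, hpf, decide_eq_true_eq]
    omega
  have hperm1 : (pairs.filter pb ++ pairs.filter pf).Perm
      (pairs.filter (fun p => pb p || pf p)) :=
    pvFilterOrPerm pb pf pairs (fun x _ => hdisj x)
  have hperm2 : (pairs.filter (fun p => pb p || pf p)).Perm
      ((PySem.List.enumerate comp).filter (fun p => pb p || pf p)) :=
    (PySem.List.sorted_perm _ _ _).filter _
  set target := (PySem.List.enumerate comp (0 : Int)).filter (fun p => pb p || pf p) with ht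
  have htp : target.Perm (pairs.filter pb ++ pairs.filter pf) :=
    (hperm1.trans hperm2).symm
  have hmono : target.Pairwise (fun a b : Int × Int => a.1 < b.1) :=
    List.Pairwise.sublist List.filter_sublist (PySem.List.pairwise_lt_enumerate comp 0)
  have hsorted : PySem.List.sorted (pairs.filter pb ++ pairs.filter pf) (fun p => p.1) = target :=
    PySem.List.sorted_eq_of_perm_of_pairwise_lt _ _ _ htp hmono
  rw [hsorted, ht]
  have hq : (fun p : Int × Int => pb p || pf p) = (fun p : Int × Int => (fun s => pb (0, s) || pf (0, s)) p.2) := by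
    funext p; simp [hpb, hpf]
  rw [hq]
  rw [pvEnumFilterMap (fun s => pb (0, s) || pf (0, s)) r comp 0]
  congr 1
  apply List.filter_congr
  intro s _
  simp only [hpb, hpf, pvPred]
  apply Bool.eq_iff_iff.mpr
  simp only [Bool.or_eq_true, decide_eq_true_eq]
  omega

lemma pvFlatMapSingleton {α β : Type} (g : α → β) :
    ∀ (l : List α), l.flatMap (fun x => [g x]) = l.map g := by
  intro l
  induction l with
  | nil => simp
  | cons h t ih => simp [ih]

-- main induction over the roots
lemma pvMain (f b : Int) (comp : List Int) :
    ∀ (roots : List Int) (acc : List (Int × Int)),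
    roots.foldl (fun result root =>
      comp.foldl (fun result sample =>
        let result := if sample ≤ root + f ∧ sample > root then result ++ [(root, sample)] else result
        if sample ≥ root - b ∧ sample < root then result ++ [(root, sample)] else result)
        result) acc
    = roots.foldl (fun result root =>
        (PySem.List.sorted
          (PySem.List.slice (PySem.List.sorted (PySem.List.enumerate comp) (fun p => p.2))
              (some ((PySem.List.bisectLeft ((PySem.List.sorted (PySem.List.enumerate comp) (fun p => p.2)).map (fun p => p.2)) (root - b) : Nat) : Int))
              (some ((PySem.List.bisectLeft ((PySem.List.sorted (PySem.List.enumerate comp) (fun p => p.2)).map (fun p => p.2)) root : Nat) : Int))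
            ++ PySem.List.slice (PySem.List.sorted (PySem.List.enumerate comp) (fun p => p.2))
              (some ((PySem.List.bisectRight ((PySem.List.sorted (PySem.List.enumerate comp) (fun p => p.2)).map (fun p => p.2)) root : Nat) : Int))
              (some ((PySem.List.bisectRight ((PySem.List.sorted (PySem.List.enumerate comp) (fun p => p.2)).map (fun p => p.2)) (root + f) : Nat) : Int)))
          (fun p => p.1)).foldl (fun result p => result ++ [(root, p.2)]) result) acc := by
  intro roots
  induction roots with
  | nil => intro acc; simp
  | cons r t ih =>
    intro acc
    simp only [List.foldl_cons]
    rw [pvInnerA f b r comp acc]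
    rw [PySem.List.foldl_append_eq_flatMap]
    have : (PySem.List.sorted
        (PySem.List.slice (PySem.List.sorted (PySem.List.enumerate comp) (fun p => p.2))
            (some ((PySem.List.bisectLeft ((PySem.List.sorted (PySem.List.enumerate comp) (fun p => p.2)).map (fun p => p.2)) (r - b) : Nat) : Int))
            (some ((PySem.List.bisectLeft ((PySem.List.sorted (PySem.List.enumerate comp) (fun p => p.2)).map (fun p => p.2)) r : Nat) : Int))
          ++ PySem.List.slice (PySem.List.sorted (PySem.List.enumerate comp) (fun p => p.2))
            (some ((PySem.List.bisectRight ((PySem.List.sorted (PySem.List.enumerate comp) (fun p => p.2)).map (fun p => p.2)) r : Nat) : Int))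
            (some ((PySem.List.bisectRight ((PySem.List.sorted (PySem.List.enumerate comp) (fun p => p.2)).map (fun p => p.2)) (r + f) : Nat) : Int)))
        (fun p => p.1)).flatMap (fun p => [(r, p.2)])
        = (comp.filter (pvPred f b r)).map (fun s => (r, s)) := by
      rw [← pvPerRoot comp f b r]
      rw [pvFlatMapSingleton]
    rw [this, ih]

-- ===== VERDICT (by name: the statement is the Claim_ definition above) =====
theorem positionalPairingOfTwoArrays_spec : Claim_equal_positionalPairingOfTwoArrays := by
  intro roots comp f b _
  unfold Spec_positionalPairingOfTwoArrays positionalPairingOfTwoArrays positionalPairingOfTwoArrays_alt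
  exact pvMain f b comp roots []
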